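-- pv_equiv track=rewrite | github.com/MordauntSparrow/sparrow-erp-pub | app/organization_profile.py | _normalised_raw_key
-- ===== SOURCE A (Python) =====
-- def _normalised_raw_key(token: str) -> str:
--     s = (
--         str(token)
--         .strip()
--         .lower()
--         .replace("&", " and ")
--         .replace(" ", "_")
--         .replace("-", "_")
--     )
--     while "__" in s:
--         s = s.replace("__", "_")
--     return s
-- ===== SOURCE B (Python) =====
-- def _normalised_raw_key(token: str) -> str:
--     s0 = str(token).strip().lower().replace("&", " and ")
--     out = []
--     prev_us = False
--     for ch in s0:
--         if ch == " " or ch == "-" or ch == "_":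
--             if not prev_us:
--                 out.append("_")
--                 prev_us = True
--         else:
--             out.append(ch)
--             prev_us = False
--     return "".join(out)
-- ===== Notes on version B (the rewrite author's own statement) =====
-- stated objective: alternative
-- what changed: Replaces A's chain of global string replaces plus a fixpoint while-loop that collapses doubled separators with a single stateful left-to-right pass that emits one underscore per run of space/hyphen/underscore, tracking whether the last emitted character was an underscore.
import Mathlib
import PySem

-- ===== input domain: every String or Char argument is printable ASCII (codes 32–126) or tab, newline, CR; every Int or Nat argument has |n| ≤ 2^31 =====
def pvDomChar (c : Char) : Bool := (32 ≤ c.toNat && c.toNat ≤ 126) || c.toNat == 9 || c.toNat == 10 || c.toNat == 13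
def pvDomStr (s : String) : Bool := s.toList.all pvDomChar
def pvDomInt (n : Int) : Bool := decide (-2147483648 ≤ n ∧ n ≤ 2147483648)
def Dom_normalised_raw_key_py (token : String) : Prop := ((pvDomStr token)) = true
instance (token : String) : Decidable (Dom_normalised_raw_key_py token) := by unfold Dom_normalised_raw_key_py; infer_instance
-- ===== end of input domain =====

-- B replaces A's chain of global replaces + fixpoint '__'-collapsing while-loop by one
-- stateful left-to-right pass (same return value; neither mutates its argument).

-- ===== PORT A =====
-- Helpers the port itself needs: termination of the 'while "__" in s' loop
-- (each replace("__","_") strictly shortens the string); cited by decreasing_by.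

-- what one Python replace("__","_") pass computes, as a simple recursion
def pvRepDD : List Char → List Char
  | '_' :: '_' :: t => '_' :: pvRepDD t
  | c :: t => c :: pvRepDD t
  | [] => []

-- two consecutive underscores exist ("__" in s)
def pvHasDD : List Char → Bool
  | a :: b :: t => (a == '_' && b == '_') || pvHasDD (b :: t)
  | _ => false

theorem pvNotDD {c : Char} {t : List Char} (h : ¬(c = '_' ∧ t.head? = some '_')) :
    ∀ t₁, c = '_' → t = '_' :: t₁ → False :=
  fun _ hc ht => h ⟨hc, by rw [ht]; rfl⟩

theorem pvNotPrefix {c : Char} {t : List Char} (h : ¬(c = '_' ∧ t.head? = some '_')) :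
    List.isPrefixOf ['_','_'] (c :: t) = false := by
  match t with
  | [] => simp [List.isPrefixOf]
  | d :: t' =>
    simp only [List.isPrefixOf, Bool.and_eq_false_iff]
    by_cases hc : c = '_'
    · right; left
      simp only [beq_eq_false_iff_ne, ne_eq]
      intro hd; exact h ⟨hc, by rw [hd]; rfl⟩
    · left; simp [Ne.symm hc]

theorem pvRepDD_go (fuel : Nat) : ∀ (l acc : List Char), l.length ≤ fuel →
    PySem.Chars.replace.go ['_','_'] ['_'] fuel l acc = acc.reverse ++ pvRepDD l := by
  induction fuel with
  | zero =>
    intro l acc h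
    have hl : l = [] := List.eq_nil_of_length_eq_zero (Nat.le_zero.mp h)
    subst hl
    rw [PySem.Chars.replace.go]
    simp [pvRepDD]
  | succ n ih =>
    intro l acc h
    match l with
    | [] => rw [PySem.Chars.replace.go] <;> simp [pvRepDD]
    | c :: t =>
      rw [PySem.Chars.replace.go]
      by_cases hdd : c = '_' ∧ t.head? = some '_'
      · obtain ⟨rfl, hh⟩ := hdd
        obtain ⟨t', rfl⟩ : ∃ t', t = '_' :: t' := by
          cases t with
          | nil => simp at hh
          | cons d t' => simp at hh; exact ⟨t', by rw [hh]⟩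
        have hp : List.isPrefixOf ['_','_'] ('_' :: '_' :: t') = true := by
          simp [List.isPrefixOf]
        simp only [hp, if_true]
        have hdrop : List.drop (['_','_'] : List Char).length ('_' :: '_' :: t') = t' := rfl
        rw [hdrop, ih t' _ (by simp at h ⊢; omega)]
        simp [pvRepDD]
      · simp only [pvNotPrefix hdd, Bool.false_eq_true, if_false]
        rw [ih t (c :: acc) (by simp at h ⊢; omega)]
        rw [pvRepDD.eq_2 c t (pvNotDD hdd)]
        simp

theorem pvReplaceDD_eq (cs : List Char) :
    PySem.Chars.replace cs ['_','_'] ['_'] = pvRepDD cs := by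
  rw [PySem.Chars.replace]
  simp only [List.isEmpty]
  exact pvRepDD_go cs.length cs [] (le_refl _)

theorem pvRepDD_len_le (cs : List Char) : (pvRepDD cs).length ≤ cs.length := by
  induction cs using pvRepDD.induct <;> simp [pvRepDD, *] <;> omega

theorem pvHasDD_iff_infix (cs : List Char) : pvHasDD cs = true ↔ ['_','_'] <:+: cs := by
  induction cs with
  | nil => simp [pvHasDD]
  | cons a t ih =>
    match t with
    | [] =>
      constructor
      · intro h; simp [pvHasDD] at h
      · intro h
        have := h.length_le
        simp at this
    | b :: t' =>
      rw [pvHasDD, List.infix_cons_iff]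
      constructor
      · intro h
        rcases Bool.or_eq_true_iff.mp h with h | h
        · simp only [Bool.and_eq_true, beq_iff_eq] at h
          left; exact ⟨t', by simp [h.1, h.2]⟩
        · right; exact ih.mp h
      · rintro (⟨r, hr⟩ | h)
        · have : a = '_' ∧ b = '_' := by
            have h1 := hr
            simp only [List.cons_append, List.cons.injEq] at h1
            exact ⟨h1.1.symm, h1.2.1.symm⟩
          simp [this.1, this.2]
        · simp [ih.mpr h]

theorem pvHasDD_tail {c : Char} {t : List Char} (h : pvHasDD (c :: t) = true)
    (hne : ¬(c = '_' ∧ t.head? = some '_')) : pvHasDD t = true := by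
  cases t with
  | nil => simp [pvHasDD] at h
  | cons b t' =>
    rw [pvHasDD] at h
    rcases Bool.or_eq_true_iff.mp h with h1 | h1
    · simp only [Bool.and_eq_true, beq_iff_eq] at h1
      exact absurd ⟨h1.1, by rw [h1.2]; rfl⟩ hne
    · exact h1

theorem pvRepDD_len_lt (cs : List Char) (h : pvHasDD cs = true) :
    (pvRepDD cs).length < cs.length := by
  induction cs using pvRepDD.induct with
  | case1 t _ =>
    have := pvRepDD_len_le t
    simp [pvRepDD]; omega
  | case2 c t hne ih =>
    have hne' : ¬(c = '_' ∧ t.head? = some '_') := by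
      rintro ⟨hc, hh⟩
      cases t with
      | nil => simp at hh
      | cons d t' => simp at hh; exact hne t' hc (by rw [hh])
    rw [pvRepDD.eq_2 c t (pvNotDD hne')]
    simpa using ih (pvHasDD_tail h hne')
  | case3 => simp [pvHasDD] at h

-- termination lemma cited by the while-loop port
theorem pvStep_lt (s : String) (h : PySem.Str.isIn "__" s = true) :
    (PySem.Str.replace s "__" "_").toList.length < s.toList.length := by
  rw [PySem.Str.toList_replace]
  rw [show ("__" : String).toList = ['_','_'] from by decide,
      show ("_" : String).toList = ['_'] from by decide,
      pvReplaceDD_eq]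
  apply pvRepDD_len_lt
  rw [pvHasDD_iff_infix]
  have h2 := (PySem.Str.isIn_iff_infix "__" s).mp h
  rwa [show ("__" : String).toList = ['_','_'] from by decide] at h2

-- while "__" in s: s = s.replace("__", "_")
def pvWhileDD (s : String) : String :=
  if h : PySem.Str.isIn "__" s = true then pvWhileDD (PySem.Str.replace s "__" "_") else s
termination_by s.toList.length
decreasing_by exact pvStep_lt s h

def normalised_raw_key_py (token : String) : String :=
  pvWhileDD
    (PySem.Str.replace
      (PySem.Str.replace
        (PySem.Str.replace (PySem.Str.lower (PySem.Str.strip token)) "&" " and ")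
        " " "_")
      "-" "_")

-- ===== PORT B =====
-- the for-loop of Source B: prev_us is the Bool state, out is built by the recursion
def pvPass (prev : Bool) : List Char → List Char
  | [] => []
  | c :: t =>
    if c = ' ' ∨ c = '-' ∨ c = '_' then
      if prev then pvPass true t else '_' :: pvPass true t
    else c :: pvPass false t

def normalised_raw_key_py_alt (token : String) : String :=
  String.ofList
    (pvPass false
      (PySem.Str.replace (PySem.Str.lower (PySem.Str.strip token)) "&" " and ").toList)

-- ===== PRECONDITION & SPEC =====
def Spec_normalised_raw_key_py (token : String) (out : String) : Prop := out = normalised_raw_key_py_alt token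
instance (token : String) (out : String) : Decidable (Spec_normalised_raw_key_py token out) := by unfold Spec_normalised_raw_key_py; infer_instance

-- ===== CLAIM (what is proved, stated in full; the proofs are below) =====
def Claim_equal_normalised_raw_key_py : Prop := ∀ (token : String), Dom_normalised_raw_key_py token → Spec_normalised_raw_key_py token (normalised_raw_key_py token)

-- ===== LEMMAS AND PROOFS =====

-- squeeze runs of '_' to a single '_' (prev = "last emitted char was '_'")
def pvSq (prev : Bool) : List Char → List Char
  | [] => []
  | c :: t =>
    if c = '_' then (if prev then pvSq true t else '_' :: pvSq true t)
    else c :: pvSq false t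

theorem pvSq_repDD (p : Bool) (cs : List Char) : pvSq p (pvRepDD cs) = pvSq p cs := by
  induction cs using pvRepDD.induct generalizing p with
  | case1 t ih => cases p <;> simp [pvRepDD, pvSq, ih]
  | case2 c t hne ih =>
    have hne' : ¬(c = '_' ∧ t.head? = some '_') := by
      rintro ⟨hc, hh⟩
      cases t with
      | nil => simp at hh
      | cons d t' => simp at hh; exact hne t' hc (by rw [hh])
    rw [pvRepDD.eq_2 c t (pvNotDD hne')]
    by_cases hc : c = '_' <;> cases p <;> simp [pvSq, hc, ih]
  | case3 => rfl

theorem pvSq_id (cs : List Char) (h : pvHasDD cs = false) :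
    pvSq false cs = cs ∧ (cs.head? ≠ some '_' → pvSq true cs = cs) := by
  induction cs with
  | nil => simp [pvSq]
  | cons c t ih =>
    have ht : pvHasDD t = false := by
      cases t with
      | nil => simp [pvHasDD]
      | cons b t' =>
        rw [pvHasDD, Bool.or_eq_false_iff] at h
        exact h.2
    obtain ⟨ih1, ih2⟩ := ih ht
    by_cases hc : c = '_'
    · subst hc
      have hth : t.head? ≠ some '_' := by
        cases t with
        | nil => simp
        | cons b t' =>
          rw [pvHasDD, Bool.or_eq_false_iff] at h
          have h1 : ¬ b = '_' := by
            have := h.1; simp at this; exact this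
          simp [h1]
      constructor
      · simp [pvSq, ih2 hth]
      · intro hh; simp at hh
    · constructor
      · simp [pvSq, hc, ih1]
      · intro _; simp [pvSq, hc, ih1]

theorem pvWhileDD_eq_sq (s : String) : pvWhileDD s = String.ofList (pvSq false s.toList) := by
  rw [pvWhileDD]
  by_cases h : PySem.Str.isIn "__" s = true
  · rw [dif_pos h]
    rw [pvWhileDD_eq_sq (PySem.Str.replace s "__" "_")]
    rw [PySem.Str.toList_replace,
        show ("__" : String).toList = ['_','_'] from by decide,
        show ("_" : String).toList = ['_'] from by decide,
        pvReplaceDD_eq, pvSq_repDD]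
  · rw [dif_neg h]
    have hdd : pvHasDD s.toList = false := by
      by_contra hx
      have := (pvHasDD_iff_infix s.toList).mp (by simpa using hx)
      exact h ((PySem.Str.isIn_iff_infix "__" s).mpr
        (by rwa [show ("__" : String).toList = ['_','_'] from by decide]))
    rw [(pvSq_id s.toList hdd).1, String.ofList_toList]
termination_by s.toList.length
decreasing_by exact pvStep_lt s h

theorem pvPass_eq_sq (p : Bool) (cs : List Char) :
    pvPass p cs = pvSq p (cs.map (fun c => if c = ' ' then '_' else if c = '-' then '_' else c)) := by
  induction cs generalizing p with
  | nil => rfl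
  | cons c t ih =>
    by_cases h1 : c = ' '
    · subst h1; cases p <;> simp [pvPass, pvSq, ih]
    · by_cases h2 : c = '-'
      · subst h2; cases p <;> simp [pvPass, pvSq, ih]
      · by_cases h3 : c = '_'
        · subst h3; cases p <;> simp [pvPass, pvSq, ih]
        · cases p <;> simp [pvPass, pvSq, h1, h2, h3, ih]

theorem pvReplaceSingle_go (a b : Char) (fuel : Nat) : ∀ (l acc : List Char), l.length ≤ fuel →
    PySem.Chars.replace.go [a] [b] fuel l acc
      = acc.reverse ++ l.map (fun c => if c = a then b else c) := by
  induction fuel with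
  | zero =>
    intro l acc h
    have hl : l = [] := List.eq_nil_of_length_eq_zero (Nat.le_zero.mp h)
    subst hl
    rw [PySem.Chars.replace.go]; simp
  | succ n ih =>
    intro l acc h
    match l with
    | [] => rw [PySem.Chars.replace.go] <;> simp
    | c :: t =>
      rw [PySem.Chars.replace.go]
      by_cases hc : c = a
      · subst hc
        have hp : List.isPrefixOf [c] (c :: t) = true := by simp [List.isPrefixOf]
        simp only [hp, if_true]
        have hdrop : List.drop ([c] : List Char).length (c :: t) = t := rfl
        rw [hdrop, ih t _ (by simp at h ⊢; omega)]
        simp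
      · have hp : List.isPrefixOf [a] (c :: t) = false := by
          simp [List.isPrefixOf]; exact fun hx => hc hx.symm
        simp only [hp, Bool.false_eq_true, if_false]
        rw [ih t (c :: acc) (by simp at h ⊢; omega)]
        simp [hc]

theorem pvReplaceSingle (a b : Char) (cs : List Char) :
    PySem.Chars.replace cs [a] [b] = cs.map (fun c => if c = a then b else c) := by
  rw [PySem.Chars.replace]
  simp only [List.isEmpty]
  exact pvReplaceSingle_go a b cs.length cs [] (le_refl _)

-- ===== VERDICT (by name: the statement is the Claim_ definition above) =====
theorem normalised_raw_key_py_spec : Claim_equal_normalised_raw_key_py := by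
  intro token _
  unfold Spec_normalised_raw_key_py normalised_raw_key_py normalised_raw_key_py_alt
  rw [pvWhileDD_eq_sq, pvPass_eq_sq]
  apply congrArg String.ofList
  apply congrArg (pvSq false)
  rw [PySem.Str.toList_replace, PySem.Str.toList_replace,
      show (" " : String).toList = [' '] from by decide,
      show ("-" : String).toList = ['-'] from by decide,
      show ("_" : String).toList = ['_'] from by decide,
      pvReplaceSingle, pvReplaceSingle, List.map_map]
  apply List.map_congr_left
  intro c _
  by_cases h1 : c = ' ' <;> by_cases h2 : c = '-' <;> simp [h1, h2, Function.comp]
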